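-- pv_equiv track=rewrite | github.com/OlegVard/Bagging | main.py | prepare_data_for_com
-- ===== SOURCE A (Python) =====
-- def prepare_data_for_com(k, divided_data):
--     data_for_com = []
--     for i in range(k):
--         temp_list = []
--         for j in range(len(divided_data)):
--             if i != j:
--                 temp_list += divided_data[j]
--         data_for_com.append(temp_list)
--     return data_for_com
-- ===== SOURCE B (Python) =====
-- def prepare_data_for_com(k, divided_data):
--     # Flatten once and keep prefix offsets; each row is two slices of the flat list.
--     n = len(divided_data)
--     full = []
--     pref = [0]
--     for chunk in divided_data:
--         full += chunk
--         pref.append(len(full))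
--     out = []
--     for i in range(k):
--         if i < n:
--             out.append(full[:pref[i]] + full[pref[i + 1]:])
--         else:
--             out.append(full[:])
--     return out
-- ===== Notes on version B (the rewrite author's own statement) =====
-- stated objective: alternative
-- what changed: Instead of rebuilding each row by a nested loop over all chunk indices with an i != j test, B flattens all chunks once, records a prefix-offset table, and produces each row as two slices (before-chunk-i plus after-chunk-i) of the flat list.
import Mathlib
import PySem

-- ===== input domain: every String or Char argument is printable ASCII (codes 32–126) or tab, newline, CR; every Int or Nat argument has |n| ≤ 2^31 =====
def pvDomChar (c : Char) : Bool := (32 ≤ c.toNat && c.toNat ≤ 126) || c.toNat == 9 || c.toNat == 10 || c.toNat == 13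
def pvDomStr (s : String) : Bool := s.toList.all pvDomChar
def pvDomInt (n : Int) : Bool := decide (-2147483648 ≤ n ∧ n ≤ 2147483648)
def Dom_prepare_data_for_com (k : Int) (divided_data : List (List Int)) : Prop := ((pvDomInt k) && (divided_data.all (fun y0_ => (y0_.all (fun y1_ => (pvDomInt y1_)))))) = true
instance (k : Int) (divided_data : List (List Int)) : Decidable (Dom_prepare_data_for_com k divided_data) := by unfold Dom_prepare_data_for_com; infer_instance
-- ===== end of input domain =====

-- B flattens the chunks once and cuts each row out of the flat list with a prefix-offset table
-- instead of re-concatenating the chunks under a nested index-comparison loop (alternative decomposition).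

-- ===== PORT A =====
def prepare_data_for_com (k : Int) (divided_data : List (List Int)) : List (List Int) :=
  (PySem.List.pyRange 0 k 1).foldl
    (fun data_for_com i =>
      data_for_com ++
        [(PySem.List.pyRange 0 (divided_data.length : Int) 1).foldl
          (fun temp_list j =>
            if i ≠ j then temp_list ++ PySem.List.pyGetD divided_data j [] else temp_list) []])
    []

-- ===== PORT B =====
def prepare_data_for_com_alt (k : Int) (divided_data : List (List Int)) : List (List Int) :=
  let n : Int := divided_data.length
  let fp : List Int × List Int :=
    divided_data.foldl
      (fun s chunk => (s.1 ++ chunk, s.2 ++ [(((s.1 ++ chunk).length : Int))]))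
      ([], [0])
  let full := fp.1
  let pref := fp.2
  (PySem.List.pyRange 0 k 1).foldl
    (fun out i =>
      if i < n then
        out ++ [PySem.List.slice full none (some (PySem.List.pyGetD pref i 0)) ++
                PySem.List.slice full (some (PySem.List.pyGetD pref (i + 1) 0)) none]
      else
        out ++ [PySem.List.slice full none none])
    []

-- ===== PRECONDITION & SPEC =====
def Spec_prepare_data_for_com (k : Int) (divided_data : List (List Int)) (out : List (List Int)) : Prop := out = prepare_data_for_com_alt k divided_data
instance (k : Int) (divided_data : List (List Int)) (out : List (List Int)) : Decidable (Spec_prepare_data_for_com k divided_data out) := by unfold Spec_prepare_data_for_com; infer_instance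

-- ===== CLAIM (what is proved, stated in full; the proofs are below) =====
def Claim_equal_prepare_data_for_com : Prop := ∀ (k : Int) (divided_data : List (List Int)), Dom_prepare_data_for_com k divided_data → Spec_prepare_data_for_com k divided_data (prepare_data_for_com k divided_data)

-- ===== LEMMAS AND PROOFS =====

-- A's inner loop over j collects every chunk except the m-th:
-- it is the flattening of the first m chunks followed by the flattening of the chunks after the m-th.
theorem rowA_eq (dd : List (List Int)) (m : Nat) : ∀ (n : Nat), n ≤ dd.length →
    (List.range n).foldl
      (fun (acc : List Int) (j : Nat) =>
        if (m : Int) ≠ (j : Int) then acc ++ PySem.List.pyGetD dd (j : Int) [] else acc) []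
    = ((dd.take n).take m).flatten ++ ((dd.take n).drop (m + 1)).flatten := by
  intro n
  induction n with
  | zero => simp
  | succ n ih =>
    intro hn
    have hn' : n ≤ dd.length := by omega
    have hlt : n < dd.length := by omega
    rw [List.range_succ, List.foldl_append, ih hn']
    simp only [List.foldl_cons, List.foldl_nil]
    have hget : PySem.List.pyGetD dd (n : Int) [] = dd[n] := by
      rw [PySem.List.pyGetD_natCast]; exact List.getD_eq_getElem dd [] hlt
    have htake : dd.take (n + 1) = dd.take n ++ [dd[n]] := by
      rw [List.take_add_one]; simp [List.getElem?_eq_getElem hlt]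
    rw [hget, htake]
    have hlen : (dd.take n).length = n := by simp [hn']
    rcases Nat.lt_trichotomy m n with h | h | h
    · -- m < n : the new chunk lands in the suffix part
      have hne : (m : Int) ≠ (n : Int) := by exact_mod_cast Nat.ne_of_lt h
      have h1 : List.take m (List.take n dd ++ [dd[n]]) = List.take m (List.take n dd) :=
        List.take_append_of_le_length (by omega)
      have h2 : List.drop (m + 1) (List.take n dd ++ [dd[n]])
          = List.drop (m + 1) (List.take n dd) ++ [dd[n]] :=
        List.drop_append_of_le_length (by omega)
      rw [if_pos hne, h1, h2]
      simp [List.flatten_append, List.append_assoc]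
    · -- m = n : the new chunk is the excluded one
      subst h
      have h1 : List.take m (List.take m dd ++ [dd[m]]) = List.take m (List.take m dd) :=
        List.take_append_of_le_length (by omega)
      have h2 : List.drop (m + 1) (List.take m dd ++ [dd[m]]) = [] :=
        List.drop_eq_nil_of_le (by simp)
      have h3 : List.drop (m + 1) (List.take m dd) = [] :=
        List.drop_eq_nil_of_le (by omega)
      rw [if_neg (by simp), h1, h2, h3]
    · -- n < m : the new chunk lands in the prefix part
      have hne : (m : Int) ≠ (n : Int) := by exact_mod_cast Nat.ne_of_gt h
      have h1 : List.take m (List.take n dd ++ [dd[n]]) = List.take n dd ++ [dd[n]] :=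
        List.take_of_length_le (by simp; omega)
      have h2 : List.take m (List.take n dd) = List.take n dd :=
        List.take_of_length_le (by omega)
      have h3 : List.drop (m + 1) (List.take n dd ++ [dd[n]]) = [] :=
        List.drop_eq_nil_of_le (by simp; omega)
      have h4 : List.drop (m + 1) (List.take n dd) = [] :=
        List.drop_eq_nil_of_le (by omega)
      rw [if_pos hne, h1, h2, h3, h4]
      simp only [List.flatten_append, List.flatten_cons, List.flatten_nil,
        List.append_nil]

-- B's first loop computes the flattening together with the table of prefix lengths.
theorem fp_spec (dd : List (List Int)) : ∀ (full0 pref0 : List Int),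
    dd.foldl (fun s chunk => (s.1 ++ chunk, s.2 ++ [(((s.1 ++ chunk).length : Int))])) (full0, pref0)
    = (full0 ++ dd.flatten,
       pref0 ++ (List.range dd.length).map
         (fun j => ((full0.length : Int) + (((dd.take (j + 1)).flatten).length : Int)))) := by
  induction dd with
  | nil => intro full0 pref0; simp
  | cons c t ih =>
    intro full0 pref0
    simp only [List.foldl_cons]
    rw [ih]
    apply Prod.ext
    · simp
    · have hmap : List.map (fun j => ((full0.length : Int) + (((List.take (j + 1) (c :: t)).flatten).length : Int))) (List.range (c :: t).length)
          = (((full0 ++ c).length : Int)) :: List.map (fun j => (((full0 ++ c).length : Int) + (((List.take (j + 1) t).flatten).length : Int))) (List.range t.length) := by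
        rw [List.length_cons, List.range_succ_eq_map, List.map_cons, List.map_map]
        congr 1
        · simp
        · apply List.map_congr_left
          intro j _
          simp [Function.comp_def, List.take_succ_cons, List.length_append]
          ring
      rw [hmap]
      simp [List.append_assoc]

-- the prefix table read at position m is the length of the flattening of the first m chunks
theorem pref_get (dd : List (List Int)) (m : Nat) (hm : m ≤ dd.length) :
    PySem.List.pyGetD
      ((0 : Int) :: (List.range dd.length).map (fun j => (((dd.take (j + 1)).flatten).length : Int)))
      (m : Int) 0
    = (((dd.take m).flatten).length : Int) := by
  rw [PySem.List.pyGetD_natCast]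
  cases m with
  | zero => simp
  | succ m =>
    have hm' : m < dd.length := by omega
    simp [List.getD, List.getElem?_map, List.getElem?_range hm']

-- the corresponding cuts of the flat list recover the prefix and the suffix flattenings
theorem take_flat (dd : List (List Int)) (m : Nat) :
    dd.flatten.take ((dd.take m).flatten.length) = (dd.take m).flatten := by
  have h : dd.flatten = (dd.take m).flatten ++ (dd.drop m).flatten := by
    rw [← List.flatten_append, List.take_append_drop]
  rw [h, List.take_left]

theorem drop_flat (dd : List (List Int)) (m : Nat) :
    dd.flatten.drop ((dd.take m).flatten.length) = (dd.drop m).flatten := by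
  have h : dd.flatten = (dd.take m).flatten ++ (dd.drop m).flatten := by
    rw [← List.flatten_append, List.take_append_drop]
  rw [h, List.drop_left]

-- B's output loop appends one row per i, chosen by the bounds test
theorem foldl_append_ite_singleton {a b : Type} (l : List a) (p : a → Prop) [DecidablePred p]
    (f g : a → b) : ∀ (init : List b),
    l.foldl (fun acc x => if p x then acc ++ [f x] else acc ++ [g x]) init
    = init ++ l.map (fun x => if p x then f x else g x) := by
  induction l with
  | nil => intro init; simp
  | cons x t ih =>
    intro init
    simp only [List.foldl_cons, List.map_cons]
    rw [ih]
    by_cases h : p x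
    · simp [h]
    · simp [h]

-- ===== VERDICT (by name: the statement is the Claim_ definition above) =====
theorem prepare_data_for_com_spec : Claim_equal_prepare_data_for_com := by
  intro k dd _
  unfold Spec_prepare_data_for_com prepare_data_for_com prepare_data_for_com_alt
  rw [fp_spec]
  simp only [List.nil_append, List.length_nil, Nat.cast_zero, zero_add, List.singleton_append]
  -- both output loops append one row per i : turn them into maps over the same range
  rw [PySem.List.foldl_append_singleton_eq_map]
  rw [foldl_append_ite_singleton]
  simp only [List.nil_append]
  apply List.map_congr_left
  intro i hi
  have hi0 : 0 ≤ i := (PySem.List.mem_pyRange_one.mp hi).1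
  obtain ⟨m, rfl⟩ : ∃ m : Nat, i = (m : Int) := ⟨i.toNat, (Int.toNat_of_nonneg hi0).symm⟩
  -- the A row
  have hA : (PySem.List.pyRange 0 (dd.length : Int) 1).foldl
      (fun temp_list j =>
        if (m : Int) ≠ j then temp_list ++ PySem.List.pyGetD dd j [] else temp_list) []
      = (dd.take m).flatten ++ (dd.drop (m + 1)).flatten := by
    rw [PySem.List.pyRange_one]
    simp only [sub_zero, Int.toNat_natCast, List.foldl_map, zero_add]
    rw [rowA_eq dd m dd.length le_rfl]
    simp
  rw [hA]
  by_cases hlt : (m : Int) < (dd.length : Int)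
  · have hmn : m < dd.length := by exact_mod_cast hlt
    rw [if_pos hlt, pref_get dd m (by omega)]
    have : (m : Int) + 1 = ((m + 1 : Nat) : Int) := by push_cast; ring
    rw [this, pref_get dd (m + 1) (by omega)]
    rw [PySem.List.slice_to_natCast, PySem.List.slice_from_natCast]
    rw [take_flat, drop_flat]
  · have hmn : dd.length ≤ m := by exact_mod_cast not_lt.mp hlt
    rw [if_neg hlt, PySem.List.slice_none_none]
    rw [List.take_of_length_le hmn, List.drop_eq_nil_of_le (by omega)]
    simp
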